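-- pv_equiv track=rewrite | github.com/SurvivingJ/LinguaLoop-web | Portal/MusicDojo/guitar_exercise_engine.py | suggest_rest_day
-- ===== SOURCE A (Python) =====
-- from typing import List, Dict, Optional
--
-- def suggest_rest_day(practice_logs: List[Dict]) -> bool:
--     """
--     Suggest rest day based on quality trend
--     Criteria: Quality ratings decreasing over 3+ sessions (3→2→1→1)
--     """
--     if len(practice_logs) < 3:
--         return False
--
--     last_four = practice_logs[-4:] if len(practice_logs) >= 4 else practice_logs[-3:]
--     quality_ratings = [log.get("quality_rating", 2) for log in last_four]
--
--     # Check for decreasing trend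
--     for i in range(len(quality_ratings) - 1):
--         if quality_ratings[i] < quality_ratings[i + 1]:
--             return False  # Not consistently decreasing
--
--     return True  # Trend is flat or decreasing
-- ===== SOURCE B (Python) =====
-- from typing import List, Dict
--
-- def suggest_rest_day(practice_logs: List[Dict]) -> bool:
--     if len(practice_logs) < 3:
--         return False
--     ratings = [log.get("quality_rating", 2) for log in practice_logs[-4:]]
--     return ratings == sorted(ratings, reverse=True)
-- ===== Notes on version B (the rewrite author's own statement) =====
-- stated objective: idiomatic
-- what changed: Replaces the index-based adjacent-pair loop with a comparison of the ratings list against its stable descending sort, and drops the redundant len>=4 branch (a [-4:] slice already yields the whole list when len==3).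
import Mathlib
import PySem

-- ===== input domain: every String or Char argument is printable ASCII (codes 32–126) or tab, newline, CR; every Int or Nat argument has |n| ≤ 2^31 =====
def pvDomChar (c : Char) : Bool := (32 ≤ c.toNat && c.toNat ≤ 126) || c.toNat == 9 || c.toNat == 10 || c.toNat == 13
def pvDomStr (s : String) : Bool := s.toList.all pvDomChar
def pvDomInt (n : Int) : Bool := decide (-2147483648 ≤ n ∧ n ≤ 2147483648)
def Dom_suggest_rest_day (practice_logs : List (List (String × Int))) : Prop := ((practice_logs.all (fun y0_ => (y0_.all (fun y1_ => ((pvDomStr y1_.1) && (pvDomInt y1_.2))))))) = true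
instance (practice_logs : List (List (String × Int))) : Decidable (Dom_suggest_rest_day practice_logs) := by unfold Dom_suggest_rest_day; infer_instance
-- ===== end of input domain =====

-- B replaces A's index loop over adjacent pairs by comparing the ratings list with its
-- stable descending sort, and drops A's redundant len>=4 branch (idiomatic; same cost).


-- ===== PORT A =====
-- the 'for i in range(len(quality_ratings) - 1): if qr[i] < qr[i+1]: return False' loop
def srdLoop (qr : List Int) : List Int → Bool
  | [] => true
  | i :: rest =>
      if PySem.List.pyGetD qr i 0 < PySem.List.pyGetD qr (i + 1) 0 then false
      else srdLoop qr rest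

def ratingsOf (logs : List (List (String × Int))) : List Int :=
  logs.map (fun log => PySem.Dict.getD (PySem.Dict.mk log) "quality_rating" 2)

def suggest_rest_day (practice_logs : List (List (String × Int))) : Bool :=
  if PySem.List.len practice_logs < 3 then false
  else
    srdLoop
      (ratingsOf (if PySem.List.len practice_logs ≥ 4 then PySem.List.slice practice_logs (some (-4)) none
                  else PySem.List.slice practice_logs (some (-3)) none))
      (PySem.List.pyRange 0
        (PySem.List.len (ratingsOf (if PySem.List.len practice_logs ≥ 4 then PySem.List.slice practice_logs (some (-4)) none
                  else PySem.List.slice practice_logs (some (-3)) none)) - 1) 1)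

-- ===== PORT B =====
def suggest_rest_day_alt (practice_logs : List (List (String × Int))) : Bool :=
  if PySem.List.len practice_logs < 3 then false
  else
    ratingsOf (PySem.List.slice practice_logs (some (-4)) none) ==
      PySem.List.sorted (ratingsOf (PySem.List.slice practice_logs (some (-4)) none)) (fun x => x) true

-- ===== PRECONDITION & SPEC =====
def Spec_suggest_rest_day (practice_logs : List (List (String × Int))) (out : Bool) : Prop := out = suggest_rest_day_alt practice_logs
instance (practice_logs : List (List (String × Int))) (out : Bool) : Decidable (Spec_suggest_rest_day practice_logs out) := by unfold Spec_suggest_rest_day; infer_instance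

-- ===== CLAIM (what is proved, stated in full; the proofs are below) =====
def Claim_equal_suggest_rest_day : Prop := ∀ (practice_logs : List (List (String × Int))), Dom_suggest_rest_day practice_logs → Spec_suggest_rest_day practice_logs (suggest_rest_day practice_logs)

-- ===== LEMMAS AND PROOFS =====

-- A's early-return loop is an 'all' over the index list
theorem srdLoop_eq_all (qr : List Int) (idxs : List Int) :
    srdLoop qr idxs =
      idxs.all (fun i => !(decide (PySem.List.pyGetD qr i 0 < PySem.List.pyGetD qr (i + 1) 0))) := by
  induction idxs with
  | nil => rfl
  | cons i rest ih =>
      simp only [srdLoop, List.all_cons]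
      split_ifs with h <;> simp [h, ih]

-- A's adjacent-pair scan decides the non-increasing chain property
theorem srdLoop_eq_chain (qr : List Int) :
    srdLoop qr (PySem.List.pyRange 0 (PySem.List.len qr - 1) 1) =
      decide (List.IsChain (fun a b : Int => b ≤ a) qr) := by
  rw [srdLoop_eq_all, Bool.eq_iff_iff]
  simp only [List.all_eq_true, Bool.not_eq_eq_eq_not, Bool.not_true, decide_eq_false_iff_not,
    decide_eq_true_eq, List.isChain_iff_getElem, PySem.List.mem_pyRange_one, PySem.List.len_eq]
  constructor
  · intro h n hn
    have h0 : (0 : Int) ≤ (n : Int) := by positivity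
    have h1 : (n : Int) < (qr.length : Int) - 1 := by omega
    have := h (n : Int) ⟨h0, h1⟩
    rw [PySem.List.pyGetD_eq_getElem qr 0 h0 (by omega)] at this
    rw [PySem.List.pyGetD_eq_getElem qr (i := (n : Int) + 1) 0 (by omega) (by omega)] at this
    simp only [Int.toNat_natCast] at this
    have hcast : ((n : Int) + 1).toNat = n + 1 := by omega
    simp only [hcast] at this
    omega
  · intro h i ⟨hi0, hi1⟩
    rw [PySem.List.pyGetD_eq_getElem qr (i := i) 0 hi0 (by omega)]
    rw [PySem.List.pyGetD_eq_getElem qr (i := i + 1) 0 (by omega) (by omega)]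
    have := h i.toNat (by omega)
    have hcast : (i + 1).toNat = i.toNat + 1 := by omega
    simp only [hcast]
    omega

-- a list equals its stable descending sort iff it is non-increasing
theorem beq_sorted_eq_chain (qr : List Int) :
    (qr == PySem.List.sorted qr (fun x => x) true) =
      decide (List.IsChain (fun a b : Int => b ≤ a) qr) := by
  rw [Bool.eq_iff_iff]
  simp only [beq_iff_eq, decide_eq_true_eq]
  constructor
  · intro h
    rw [List.isChain_iff_pairwise]
    have := PySem.List.sorted_pairwise_rev (xs := qr) (key := fun x : Int => x)
    rw [← h] at this
    exact this
  · intro h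
    exact (PySem.List.sorted_rev_eq_self_of_pairwise qr (fun x => x)
      ((List.isChain_iff_pairwise).mp h)).symm

-- the two slices coincide: for len == 3, [-4:] and [-3:] both return the whole list
theorem slice_agree (pl : List (List (String × Int))) (h3 : 3 ≤ pl.length) :
    (if PySem.List.len pl ≥ 4 then PySem.List.slice pl (some (-4)) none
     else PySem.List.slice pl (some (-3)) none) =
      PySem.List.slice pl (some (-4)) none := by
  split_ifs with h4
  · rfl
  · have hl : pl.length = 3 := by
      simp only [PySem.List.len_eq] at h4; omega
    rw [PySem.List.slice_from_neg_ofNat pl 3 (by omega), PySem.List.slice_from_neg_ofNat pl 4 (by omega)]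
    simp [hl]

-- ===== VERDICT (by name: the statement is the Claim_ definition above) =====
theorem suggest_rest_day_spec : Claim_equal_suggest_rest_day := by
  intro pl _
  unfold Spec_suggest_rest_day suggest_rest_day suggest_rest_day_alt
  by_cases hlt : PySem.List.len pl < 3
  · rw [if_pos hlt, if_pos hlt]
  · have h3 : 3 ≤ pl.length := by
      simp only [PySem.List.len_eq] at hlt; omega
    rw [if_neg hlt, if_neg hlt, slice_agree pl h3, srdLoop_eq_chain, beq_sorted_eq_chain]
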